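-- pv_equiv track=rewrite | github.com/1899nils/Shelve | src/app/providers/tmdb.py | find_next_episode
-- ===== SOURCE A (Python) =====
-- def find_next_episode(episode_number, episodes_metadata):
--     """Find the next episode number."""
--     # Find the current episode in the sorted list
--     current_episode_index = None
--     for index, episode in enumerate(episodes_metadata):
--         if episode["episode_number"] == episode_number:
--             current_episode_index = index
--             break
--
--     # If episode not found or it's the last episode, return None
--     if current_episode_index is None or current_episode_index + 1 >= len(
--         episodes_metadata,
--     ):
--         return None
--
--     # Return the next episode number
--     return episodes_metadata[current_episode_index + 1]["episode_number"]
-- ===== SOURCE B (Python) =====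
-- def find_next_episode(episode_number, episodes_metadata):
--     """Build a successor map in one backward pass, then look the answer up."""
--     successor = {}
--     following = None
--     for episode in reversed(episodes_metadata):
--         num = episode["episode_number"]
--         successor[num] = following
--         following = num
--     return successor.get(episode_number)
-- ===== Notes on version B (the rewrite author's own statement) =====
-- stated objective: alternative
-- what changed: Replaces A's forward linear search (find the matching index, then bounds-check and subscript index+1) by a backward pass that builds a successor dictionary (each episode number mapped to the number following its first occurrence) and answers with one dict lookup.
-- outside the precondition, e.g. on find_next_episode(1, [{'episode_number': 1}, {'episode_number': 2}, {}]): A returns 2, B raises KeyError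
import Mathlib
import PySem

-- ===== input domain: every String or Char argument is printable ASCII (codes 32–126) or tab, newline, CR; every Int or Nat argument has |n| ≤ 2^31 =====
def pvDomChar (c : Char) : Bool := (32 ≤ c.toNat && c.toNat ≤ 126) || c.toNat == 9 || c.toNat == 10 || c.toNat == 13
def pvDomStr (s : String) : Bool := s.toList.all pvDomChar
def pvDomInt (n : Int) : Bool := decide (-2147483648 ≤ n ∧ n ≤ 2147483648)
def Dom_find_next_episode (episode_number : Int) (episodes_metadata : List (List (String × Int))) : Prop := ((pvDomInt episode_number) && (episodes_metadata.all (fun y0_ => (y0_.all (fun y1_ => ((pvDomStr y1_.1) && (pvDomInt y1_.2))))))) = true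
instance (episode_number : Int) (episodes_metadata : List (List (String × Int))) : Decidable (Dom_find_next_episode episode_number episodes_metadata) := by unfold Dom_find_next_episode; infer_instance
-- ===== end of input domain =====

-- B replaces A's forward find-index-then-index+1-lookup by a backward pass building a successor dictionary plus one lookup (alternative algorithm; same O(n) cost).


-- ===== PORT A =====
-- the 'for index, episode in enumerate(...): if ... break' loop computing current_episode_index
def findIndexLoop (episode_number : Int) : List (List (String × Int)) → Nat → Option Nat
  | [], _ => none
  | episode :: rest, index =>
    if (PySem.Dict.mk episode).get? "episode_number" == some episode_number then some index
    else findIndexLoop episode_number rest (index + 1)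

def find_next_episode (episode_number : Int) (episodes_metadata : List (List (String × Int))) : Option Int :=
  let current_episode_index := findIndexLoop episode_number episodes_metadata 0
  match current_episode_index with
  | none => none
  | some i =>
    if i + 1 ≥ episodes_metadata.length then none
    else match PySem.List.pyGet? episodes_metadata ((i : Int) + 1) with
      | none => none  -- unreachable: i+1 < len
      | some episode => (PySem.Dict.mk episode).get? "episode_number"

-- ===== PORT B =====
-- one step of the 'for episode in reversed(...)' loop; state = (successor, following).
-- (Python raises KeyError on a dict missing "episode_number"; Pre_ excludes those inputs, the 'none' branch keeps the state.)
def succStep (st : PySem.Dict Int (Option Int) × Option Int) (episode : List (String × Int)) :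
    PySem.Dict Int (Option Int) × Option Int :=
  match (PySem.Dict.mk episode).get? "episode_number" with
  | some num => (st.1.insert num st.2, some num)
  | none => st

def find_next_episode_alt (episode_number : Int) (episodes_metadata : List (List (String × Int))) : Option Int :=
  let st := episodes_metadata.reverse.foldl succStep (PySem.Dict.empty, none)
  (st.1.get? episode_number).bind id

-- ===== PRECONDITION & SPEC =====
-- Pre_ requires every episode dict to carry the "episode_number" key: A raises KeyError as soon as its
-- scan touches a dict lacking it, and B (which reads every dict) raises on any such input; the uniform
-- condition is the natural domain of the function. (It excludes some inputs where A returns because the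
-- match came before the defective dict — B's own algorithm raises there; see the cite in claim.json.)
def Pre_find_next_episode (episode_number : Int) (episodes_metadata : List (List (String × Int))) : Prop :=
  ∀ d ∈ episodes_metadata, ((PySem.Dict.mk d).get? "episode_number").isSome = true

instance (episode_number : Int) (episodes_metadata : List (List (String × Int))) : Decidable (Pre_find_next_episode episode_number episodes_metadata) := by unfold Pre_find_next_episode; infer_instance

def pvWitness_find_next_episode : Int × (List (List (String × Int))) :=
  (1, [[("episode_number", 1)], [("episode_number", 2)]])

def Spec_find_next_episode (episode_number : Int) (episodes_metadata : List (List (String × Int))) (out : Option Int) : Prop := out = find_next_episode_alt episode_number episodes_metadata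
instance (episode_number : Int) (episodes_metadata : List (List (String × Int))) (out : Option Int) : Decidable (Spec_find_next_episode episode_number episodes_metadata out) := by unfold Spec_find_next_episode; infer_instance

-- ===== CLAIM (what is proved, stated in full; the proofs are below) =====
def Claim_equal_find_next_episode : Prop := ∀ (episode_number : Int) (episodes_metadata : List (List (String × Int))), Dom_find_next_episode episode_number episodes_metadata → Pre_find_next_episode episode_number episodes_metadata → Spec_find_next_episode episode_number episodes_metadata (find_next_episode episode_number episodes_metadata)

-- ===== LEMMAS AND PROOFS =====

-- abbreviation for B's loop result
def runB (xs : List (List (String × Int))) : PySem.Dict Int (Option Int) × Option Int :=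
  xs.reverse.foldl succStep (PySem.Dict.empty, none)

lemma runB_cons (x : List (String × Int)) (xs : List (List (String × Int))) :
    runB (x :: xs) = succStep (runB xs) x := by
  simp [runB, List.foldl_append]

-- under Pre_, the 'following' component is the head element's episode number
lemma runB_snd (xs : List (List (String × Int)))
    (h : ∀ d ∈ xs, ((PySem.Dict.mk d).get? "episode_number").isSome = true) :
    (runB xs).2 = xs.head?.bind (fun d => (PySem.Dict.mk d).get? "episode_number") := by
  cases xs with
  | nil => rfl
  | cons x rest =>
    have hx := h x (List.mem_cons_self ..)
    rw [runB_cons]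
    cases hget : (PySem.Dict.mk x).get? "episode_number" with
    | none => rw [hget] at hx; simp at hx
    | some num => simp [succStep, hget]

-- the enumerate counter only shifts the returned index
lemma findIndexLoop_succ (ep : Int) (xs : List (List (String × Int))) (k : Nat) :
    findIndexLoop ep xs (k + 1) = (findIndexLoop ep xs k).map (· + 1) := by
  induction xs generalizing k with
  | nil => simp [findIndexLoop]
  | cons d rest ih =>
    simp only [findIndexLoop]
    split
    · rfl
    · exact ih (k + 1)

-- A on a non-matching head reduces to the tail
lemma A_cons_of_ne (ep : Int) (d : List (String × Int)) (rest : List (List (String × Int)))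
    (hd : ¬ ((PySem.Dict.mk d).get? "episode_number" == some ep) = true) :
    find_next_episode ep (d :: rest) = find_next_episode ep rest := by
  simp only [find_next_episode, findIndexLoop, hd, if_false, Bool.false_eq_true,
             findIndexLoop_succ]
  cases hfi : findIndexLoop ep rest 0 with
  | none => simp
  | some j =>
    simp only [Option.map_some]
    have hlen : (d :: rest).length = rest.length + 1 := rfl
    by_cases hb : j + 1 ≥ rest.length
    · simp [hlen, hb, Nat.succ_le_succ hb]
    · have hb' : ¬ (j + 1 + 1 ≥ rest.length + 1) := by omega
      simp only [hlen, hb, hb', if_false]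
      rw [show ((j + 1 : Nat) : Int) + 1 = (((j + 1 + 1 : Nat) : Int)) by push_cast; ring,
          show ((j : Int) + 1) = ((j + 1 : Nat) : Int) by push_cast; ring,
          PySem.List.pyGet?_natCast, PySem.List.pyGet?_natCast]
      simp

lemma main_lemma (ep : Int) (xs : List (List (String × Int)))
    (h : ∀ d ∈ xs, ((PySem.Dict.mk d).get? "episode_number").isSome = true) :
    find_next_episode ep xs = find_next_episode_alt ep xs := by
  induction xs with
  | nil => rfl
  | cons d rest ih =>
    have hd0 := h d (List.mem_cons_self ..)
    have hrest : ∀ e ∈ rest, ((PySem.Dict.mk e).get? "episode_number").isSome = true :=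
      fun e he => h e (List.mem_cons_of_mem _ he)
    obtain ⟨num, hnum⟩ := Option.isSome_iff_exists.mp hd0
    have hBcons : find_next_episode_alt ep (d :: rest) =
        if ep = num then (runB rest).2 else find_next_episode_alt ep rest := by
      show ((runB (d :: rest)).1.get? ep).bind id = _
      rw [runB_cons]
      simp only [succStep, hnum]
      rw [PySem.Dict.get?_insert]
      split
      · simp
      · rfl
    by_cases hmatch : num = ep
    · subst hmatch
      have hA : find_next_episode num (d :: rest) =
          rest.head?.bind (fun e => (PySem.Dict.mk e).get? "episode_number") := by
        cases rest with
        | nil => simp [find_next_episode, findIndexLoop, hnum]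
        | cons n rs =>
          simp [find_next_episode, findIndexLoop, hnum, PySem.List.pyGet?, PySem.List.pyIdx?]
      rw [hA, hBcons, if_pos rfl, runB_snd rest hrest]
      
    · have hne : ¬ ((PySem.Dict.mk d).get? "episode_number" == some ep) = true := by
        simp [hnum, hmatch]
      rw [A_cons_of_ne ep d rest hne, hBcons, if_neg (fun hh => hmatch hh.symm), ih hrest]

-- ===== VERDICT (by name: the statement is the Claim_ definition above) =====
theorem find_next_episode_spec : Claim_equal_find_next_episode := by
  intro ep xs _ hpre
  unfold Spec_find_next_episode
  exact main_lemma ep xs hpre
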